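-- pv_equiv track=rewrite | github.com/Bhavik-Gilbert/Advent-Of-Code | 2024/day8.py | generate_antenna_dict
-- ===== SOURCE A (Python) =====
-- EMPTY_CHAR = "."
--
-- def generate_antenna_dict(input_list):
--     antenna_dict = {}
--     for n, y in enumerate(input_list):
--         for i, x in enumerate(y):
--             if x == EMPTY_CHAR:
--                 continue
--
--             value = antenna_dict.get(x)
--             if value is None:
--                 value = []
--
--             value.append((n, i)) # (y, x)
--             antenna_dict[x] = value
--
--     return antenna_dict
-- ===== SOURCE B (Python) =====
-- EMPTY_CHAR = "."
--
-- def generate_antenna_dict(input_list):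
--     # Flat pair list first, then group per first-occurrence key (different decomposition).
--     pairs = [(x, (n, i))
--              for n, y in enumerate(input_list)
--              for i, x in enumerate(y)
--              if x != EMPTY_CHAR]
--     keys = dict.fromkeys(c for c, _ in pairs)
--     return {k: [pos for c, pos in pairs if c == k] for k in keys}
-- ===== Notes on version B (the rewrite author's own statement) =====
-- stated objective: alternative
-- what changed: Instead of threading a dict through the nested scan with get/append/insert, B builds a flat (char, coord) pair list, dedups the keys in first-occurrence order, and assembles each key's coordinate list with a per-key filter.
import Mathlib
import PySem

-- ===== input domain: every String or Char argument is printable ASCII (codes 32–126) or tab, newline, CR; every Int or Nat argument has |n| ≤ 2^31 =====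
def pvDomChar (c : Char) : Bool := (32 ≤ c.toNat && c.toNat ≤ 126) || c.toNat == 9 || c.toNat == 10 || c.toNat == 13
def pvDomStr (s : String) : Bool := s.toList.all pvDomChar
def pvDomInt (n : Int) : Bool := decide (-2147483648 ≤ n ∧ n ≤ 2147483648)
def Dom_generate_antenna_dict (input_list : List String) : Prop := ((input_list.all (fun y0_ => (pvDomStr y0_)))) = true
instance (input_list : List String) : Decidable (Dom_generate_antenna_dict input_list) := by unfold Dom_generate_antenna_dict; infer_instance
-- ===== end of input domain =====

-- B replaces A's dict-threaded nested scan by a flat pair list + first-occurrence key dedup + per-key filter (alternative decomposition, same results).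


-- ===== PORT A =====
def generate_antenna_dict (input_list : List String) : List (String × List (Int × Int)) :=
  let antenna_dict : PySem.Dict String (List (Int × Int)) :=
    (PySem.List.enumerate input_list).foldl (fun d ny =>
      (PySem.List.enumerate ny.2.toList).foldl (fun d ix =>
        if ix.2 == '.' then d
        else
          let value := (d.get? (String.ofList [ix.2])).getD []
          d.insert (String.ofList [ix.2]) (value ++ [(ny.1, ix.1)])) d)
      PySem.Dict.empty
  antenna_dict.items

-- ===== PORT B =====
def generate_antenna_dict_alt (input_list : List String) : List (String × List (Int × Int)) :=
  let pairs : List (String × (Int × Int)) :=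
    (PySem.List.enumerate input_list).flatMap (fun ny =>
      ((PySem.List.enumerate ny.2.toList).filter (fun ix => ix.2 != '.')).map
        (fun ix => (String.ofList [ix.2], (ny.1, ix.1))))
  let keys := PySem.List.dedup (pairs.map (·.1))
  keys.map (fun k => (k, (pairs.filter (fun p => p.1 == k)).map (·.2)))

-- ===== PRECONDITION & SPEC =====
def Spec_generate_antenna_dict (input_list : List String) (out : List (String × List (Int × Int))) : Prop := out = generate_antenna_dict_alt input_list
instance (input_list : List String) (out : List (String × List (Int × Int))) : Decidable (Spec_generate_antenna_dict input_list out) := by unfold Spec_generate_antenna_dict; infer_instance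

-- ===== CLAIM (what is proved, stated in full; the proofs are below) =====
def Claim_equal_generate_antenna_dict : Prop := ∀ (input_list : List String), Dom_generate_antenna_dict input_list → Spec_generate_antenna_dict input_list (generate_antenna_dict input_list)

-- ===== LEMMAS AND PROOFS =====

-- A's nested loop is the grouping fold over B's flat pair list.
lemma antenna_fold_eq_flat (input_list : List String) :
    ((PySem.List.enumerate input_list).foldl (fun d ny =>
        (PySem.List.enumerate ny.2.toList).foldl (fun d ix =>
          if ix.2 == '.' then d
          else
            let value := (d.get? (String.ofList [ix.2])).getD []
            d.insert (String.ofList [ix.2]) (value ++ [(ny.1, ix.1)])) d)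
      (PySem.Dict.empty : PySem.Dict String (List (Int × Int))))
    = ((PySem.List.enumerate input_list).flatMap (fun ny =>
        ((PySem.List.enumerate ny.2.toList).filter (fun ix => ix.2 != '.')).map
          (fun ix => (String.ofList [ix.2], (ny.1, ix.1))))).foldl
        (fun d p => d.modify p.1 [] (· ++ [p.2])) PySem.Dict.empty := by
  rw [List.foldl_flatMap]
  apply List.foldl_ext
  intro d ny _
  rw [List.foldl_map, List.foldl_filter]
  apply List.foldl_ext
  intro d ix _
  by_cases h : ix.2 = '.'
  · simp [h]
  · simp [h, PySem.Dict.modify, PySem.Dict.getD_eq_get?_getD]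

-- ===== VERDICT (by name: the statement is the Claim_ definition above) =====
theorem generate_antenna_dict_spec : Claim_equal_generate_antenna_dict := by
  intro input_list _
  unfold Spec_generate_antenna_dict generate_antenna_dict generate_antenna_dict_alt
  rw [antenna_fold_eq_flat]
  set ps := (PySem.List.enumerate input_list).flatMap (fun ny =>
      ((PySem.List.enumerate ny.2.toList).filter (fun ix => ix.2 != '.')).map
        (fun ix => (String.ofList [ix.2], (ny.1, ix.1)))) with hps
  have hnd : ((ps.foldl (fun d p => d.modify p.1 [] (· ++ [p.2])) PySem.Dict.empty).keys).Nodup := by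
    exact PySem.Dict.nodup_keys_foldl_modify_key ps (·.1) [] _ _ PySem.Dict.nodup_keys_empty
  rw [PySem.Dict.items_eq_map_keys _ hnd []]
  have hkeys : (ps.foldl (fun d p => d.modify p.1 [] (· ++ [p.2])) PySem.Dict.empty).keys
      = PySem.List.dedup (ps.map (·.1)) := by
    rw [PySem.Dict.keys_foldl_modify_key]
    simp [PySem.Dict.keys_empty, PySem.Set.update_nil_left, PySem.List.dedup_eq_ofList]
  rw [hkeys]
  apply List.map_congr_left
  intro k _
  rw [PySem.Dict.getD_foldl_modify_append]
  simp [PySem.Dict.getD_empty]
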